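/- GENERATED by mk_final_copies.py from the proof of the farm's unit `decode_all.5` (farm:decode_all.5.1: Proof.lean) as the
   re-elaboration sweep compiled it — do not edit. -/
import Asan.CheckWalk
import Vorbis.Spec.Units.decode_all_5

/- SEGMENT 5 OF decode_all (the frame loop's exit 103640H … the call of stb_vorbis_close at 103653H, 6 instructions), in the farm's
   format: from `AtDone st` over the calls of stb_vorbis_get_error (its store into `f->error`, a decode-time hole) and
   stb_vorbis_close (`DeinitOK` from the frame boundary, carried over that store and the stack stores) to `AtClosed st`. The walk
   starts at `v` in the middle of the function; `u` is the state at the function's entry. -/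
open X86 X86.User Asan Vorbis Vorbis.Spec

set_option maxRecDepth 4000
set_option maxHeartbeats 4000000

namespace Vorbis.Spec.decode_all_5

/-- **The caller's footprint through a callee's**: every window of the callee lies inside a window of the caller. -/
theorem seg5_through_callee {ws ws' : List Span} {m0 m1 m2 : Mem} (h : Mem.SameExcept ws m0 m1)
    (hs : Mem.SameExcept ws' m1 m2) (hsub : ∀ w ∈ ws', InSpans ws w.lo (w.hi - w.lo)) : Mem.SameExcept ws m0 m2 := by
  apply h.step_same hs
  intro w hw a h1 h2
  obtain ⟨w', hw', k1, k2⟩ := hsub w hw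
  exact ⟨w', hw', by omega, by omega⟩

/-- **Where `*f` is**, as one arithmetic fact: in the data space, off the stack region, inside the arena's buffer. -/
theorem seg5_obj_where {others : List Obj} {frames : List (Nat × FrameLayout)} {len : Nat} {A : Arena}
    {stored room : Int} {ysz : Nat → Nat} {m : Mem} {f : Nat}
    (hdi : DecodeInv others frames len A stored room ysz m f) :
    0x400000 ≤ f ∧ f + 1808 ≤ 0xC00000 ∧ (f + 1808 ≤ 0x700000 ∨ 0x800000 ≤ f) ∧ A.B ≤ f ∧ f + 1808 ≤ A.B + A.L := by
  have hoff := hdi.objOff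
  have hr := hdi.fb.vorbis.bits.OBR
  have hrange := hdi.arena.block_range (p := f) (n := Off.sizeof.stb_vorbis) hdi.obj
  have h2 := hdi.arena.AR2
  have hl := le_r8 Off.sizeof.stb_vorbis
  simp only [voff] at hoff hr hrange hl
  omega

/-- Where this segment stores (besides nothing in the shadow): the stack region and `f->error` = `[f+140, f+144)`. -/
def Seg5Span (f : Nat) (s : Span) : Prop :=
  (0x700000 ≤ s.lo ∧ s.hi ≤ 0x800000) ∨ (f + 140 ≤ s.lo ∧ s.hi ≤ f + 144)

/-- **The decode-time invariant over this segment's stores** (`DecodeInv.frame_stores`): stack stores are off every allocated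
block, `f->error` is a decode-time hole that ADO, `Bits`, M7, W1 do not read. -/
theorem seg5_decodeInv_stores {others : List Obj} {frames : List (Nat × FrameLayout)} {len : Nat} {A : Arena}
    {stored room : Int} {ysz : Nat → Nat} {m m' : Mem} {f top : Nat}
    (hdi : DecodeInv others frames len A stored room ysz m f) (hinv : ShadowInv others frames top m')
    {spans : List Span} (hs : Mem.SameExcept spans m m') (hsp : ∀ s, s ∈ spans → Seg5Span f s) :
    DecodeInv others frames len A stored room ysz m' f := by
  have hoff := hdi.objOff
  have hbits := hdi.fb.vorbis.bits
  have hr := hbits.OBR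
  simp only [voff] at hoff hr
  have hw : ∀ s, s ∈ spans → StoreOK (RunBlk A len) m f s := by
    intro s hsm
    rcases hsp s hsm with h1 | h2
    · apply StoreOK.off
      intro B hB
      have := hdi.offStack B hB
      omega
    · apply StoreOK.hole
      unfold InHole
      omega
  have hobjEq : ∀ ws : Wins, WinsBelow ws 1808 →
      (∀ w, w ∈ ws → (w.2 ≤ 140 ∨ 144 ≤ w.1)) → ObjEq ws m f m' f := by
    intro ws hbelow hmiss
    apply ObjEq.of_sameExcept hs
    · intro w hw'
      have := hbelow w hw'
      omega
    · intro w hw' s hsm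
      have hb := hbelow w hw'
      have k1 := hmiss w hw'
      rcases hsp s hsm with h1 | h2
      · omega
      · omega
  have henv : Env (RunBlk A len) (Asan.Live (stackObjs frames ++ others)) m' := ⟨hinv.shadow.covers, hdi.ok, hdi.live⟩
  have hado : ADO A others m' f := by
    refine hdi.fb.ado.frame_stores hs (by simp only [voff]; omega) ?_ ?_
    · intro s hsm
      rcases hsp s hsm with h1 | h2 <;> omega
    · intro s hsm
      rcases hsp s hsm with h1 | h2 <;> omega
  have hb' : Bits (RunBlk A len) len m' f :=
    hbits.transfer (hobjEq Bits.wins (by decide) (by decide)) ⟨hbits.OB1, hbits.OB1a⟩ hbits.OBR hbits.S2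
  have h7 : Mdct.M7Range m' f := hdi.fb.vorbis.buffers.M7.transfer (hobjEq Mdct.M7Range.wins (by decide) (by decide))
  have hw1 : W1 m' f := hdi.fb.vorbis.w1.transfer (hobjEq W1.wins (by decide) (by decide))
  exact hdi.frame_stores hs hw henv hado (fun _ => hb') (fun _ => h7) (fun _ => hw1)

end Vorbis.Spec.decode_all_5

open Vorbis.Spec.decode_all_5

/-- **Segment 5**: `error = stb_vorbis_get_error(v)`, `stb_vorbis_close(v)`. -/
theorem Vorbis.Spec.Worked.decode_all_5_ok : Vorbis.Spec.decode_all_5.Statement := by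
  intro Lay hLay μ hμ u₀ hcode h_err h_close others frames len u ret others' A ysz f st v hat
  obtain ⟨j_rip, hbody⟩ := hat
  obtain ⟨hfrm, c_rbx, c_rbp, c_r14, c_r13, k_sh, k_room, k_st, hstle, harena, hdi⟩ := hbody
  have he := hfrm.entry
  have he0 := he
  have hpre0 := hfrm.pre
  v_entry he
  obtain ⟨_, _, c_rsp, k_r15, k_r14, k_r13, k_r12, k_rbp, k_rbx, k_ret, k_out, hsame, j_code, j_inv, hinv, hfixed, hoffT⟩ := hfrm
  obtain ⟨hAB, hAL⟩ := harena
  have hwf := seg5_obj_where hdi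
  rw [hAB, hAL] at hwf
  have herr := h_err others' (decode_all.ownFrames u frames)
  have hclose := h_close others' (decode_all.ownFrames u frames) (RunBlk A len)
  clear h_err h_close
  have w_rip := j_rip
  have w_eq := Vorbis.conv_code_eqOn j_code
  have hdf : v.flags .df = false := (show X86.User.abiInv _ from j_inv).1
  have hmx : v.mxcsr &&& 0x1F80 = 0x1F80 := (show X86.User.abiInv _ from j_inv).2
  have w_kept : RegsKept [.rsp] v v := RegsKept.refl _ _
  u_walk hcode [hμ.vendor] until [Vorbis.L.decode_all.cut7] span [Vorbis.L.textLo, Vorbis.L.textHi] side (v_side)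
  case call_inv =>
    v_inv
  case pre_103648 =>
    have e_rsp : (s_103648.reg .rsp).toNat + 8 = (u.reg .rsp).toNat - 232 := by
      rw [w_rsp]
      u_omega
    refine ⟨⟨?_, hoffT⟩, ?_⟩
    · rw [e_rsp, w_mem]
      exact ShadowInv.writeLE hinv _ _ _ (by u_omega) (by u_omega)
    · rw [w_rdi, c_r14]
      exact hdi.hand.objLive
  case cont =>
    v_after_call w_rsp_103648 w_mem_103648
    simp only [w_rdi_103648, c_r14] at w_same
    obtain ⟨_, _, hun1⟩ := w_post
    rw [w_mem_103648] at hun1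
    have hfa : 0x800000 ≤ f := hwf.2.2.2.1
    have hfb : f + 1808 ≤ 0xC00000 := hwf.2.1
    -- the stack slots through the pushed return address and get_error's footprint
    have q15 : UInt64.ofNat (s_103648r.mem.readLE (u.reg .rsp - 8) 8) = u.reg .r15 := by u_frame k_r15
    have q14 : UInt64.ofNat (s_103648r.mem.readLE (u.reg .rsp - 16) 8) = u.reg .r14 := by u_frame k_r14
    have q13 : UInt64.ofNat (s_103648r.mem.readLE (u.reg .rsp - 24) 8) = u.reg .r13 := by u_frame k_r13
    have q12 : UInt64.ofNat (s_103648r.mem.readLE (u.reg .rsp - 32) 8) = u.reg .r12 := by u_frame k_r12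
    have qbp : UInt64.ofNat (s_103648r.mem.readLE (u.reg .rsp - 40) 8) = u.reg .rbp := by u_frame k_rbp
    have qbx : UInt64.ofNat (s_103648r.mem.readLE (u.reg .rsp - 48) 8) = u.reg .rbx := by u_frame k_rbx
    have q0 : UInt64.ofNat (s_103648r.mem.readLE (u.reg .rsp) 8) = ret := by u_frame k_ret
    have qout : s_103648r.mem.readLE (u.reg .rsp - 216) 8 = 4194304 := by u_frame k_out
    have qst : s_103648r.mem.readLE (u.reg .rsp - 232) 8 = st := by u_frame k_st
    -- the footprint since the function's entry, and since `v` (for the invariant)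
    have hpush : Mem.SameExcept _ u.mem (v.mem.writeLE (u.reg .rsp - 240) 8 (UInt64.toNat (L.decode_all.at_103640 + 13))) :=
      Mem.SameExcept.step_writeLE' (u.reg .rsp - 240) 8 _ hsame (by u_omega) (by u_same_side)
    have hsame1 := seg5_through_callee hpush w_same (by
      simp only [List.forall_mem_cons, List.not_mem_nil, false_imp_iff, implies_true, and_true, X86.User.inSpans_cons,
        X86.User.inSpans_nil, or_false]
      repeat' apply And.intro
      all_goals u_omega)
    have hv0 : Mem.SameExcept [⟨0x700000, 0x800000⟩, ⟨f + 140, f + 144⟩] v.mem v.mem := Mem.SameExcept.refl _ _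
    have hv1 : Mem.SameExcept _ v.mem (v.mem.writeLE (u.reg .rsp - 240) 8 (UInt64.toNat (L.decode_all.at_103640 + 13))) :=
      Mem.SameExcept.step_writeLE' (u.reg .rsp - 240) 8 _ hv0 (by u_omega) (by u_same_side)
    have hv2 := seg5_through_callee hv1 w_same (by
      simp only [List.forall_mem_cons, List.not_mem_nil, false_imp_iff, implies_true, and_true, X86.User.inSpans_cons,
        X86.User.inSpans_nil, or_false]
      repeat' apply And.intro
      all_goals u_omega)
    -- the shadow layer after get_error
    have hinv1 : ShadowInv others' (decode_all.ownFrames u frames) ((u.reg .rsp).toNat - 232) s_103648r.mem := by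
      refine ShadowInv.untouched ?_ hun1
      exact ShadowInv.writeLE hinv _ _ _ (by u_omega) (by u_omega)
    have c_rbx1 : s_103648r.reg .rbx = u.reg .rsp - 56 := by
      rw [w_kept .rbx rfl]
      exact c_rbx
    have c_r14e : s_103648r.reg .r14 = v.reg .r14 := w_kept .r14 rfl
    clear w_same hun1
    have hdf1 := w_df
    have hmx1 := w_mx
    u_walk hcode [hμ.vendor] until [Vorbis.L.decode_all.cut7] span [Vorbis.L.textLo, Vorbis.L.textHi] side (v_side)
    case call_inv =>
      v_inv
    case pre_103653 =>
      -- the precondition of stb_vorbis_close: the invariant over get_error's store into `f->error` and the stack stores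
      have e_rsp : (s_103653.reg .rsp).toNat + 8 = (u.reg .rsp).toNat - 232 := by
        rw [w_rsp]
        u_omega
      have hv3 := Mem.SameExcept.step_writeLE' (u.reg .rsp - 152) 4 (Word.part Width.w32 (s_103648r.reg Reg.rax)).toNat hv2
        (by u_omega) (by u_same_side)
      have hv4 := Mem.SameExcept.step_writeLE' (u.reg .rsp - 240) 8 1062488 hv3 (by u_omega) (by u_same_side)
      rw [← w_mem] at hv4
      have hinv2 : ShadowInv others' (decode_all.ownFrames u frames) ((u.reg .rsp).toNat - 232) s_103653.mem := by
        rw [w_mem]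
        refine ShadowInv.writeLE (ShadowInv.writeLE hinv1 _ _ _ ?_ ?_) _ _ _ ?_ ?_
        · u_omega
        · u_omega
        · u_omega
        · u_omega
      have hdi2 : DecodeInv others' (decode_all.ownFrames u frames) len A 0 0 ysz s_103653.mem f := by
        refine seg5_decodeInv_stores hdi hinv2 hv4 ?_
        intro sp hsp
        simp only [List.mem_cons, List.not_mem_nil, or_false] at hsp
        rcases hsp with rfl | rfl
        · left
          exact ⟨Nat.le_refl _, Nat.le_refl _⟩
        · right
          exact ⟨Nat.le_refl _, Nat.le_refl _⟩
      refine ⟨⟨?_, hoffT⟩, Or.inr ⟨hdi2.ok, hdi2.live, ?_⟩⟩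
      · rw [e_rsp]
        exact hinv2
      · rw [w_rdi, c_r14]
        exact hdi2.fb.deinitOK
    case cont =>
      v_after_call w_rsp_103653 w_mem_103653
      have hun2 : ShadowUntouched s_103653.mem s_103653r.mem := w_post
      rw [w_mem_103653] at hun2
      -- the stack slots through the two stores and stb_vorbis_close's footprint
      have r15 : UInt64.ofNat (s_103653r.mem.readLE (u.reg .rsp - 8) 8) = u.reg .r15 := by u_frame q15
      have r14 : UInt64.ofNat (s_103653r.mem.readLE (u.reg .rsp - 16) 8) = u.reg .r14 := by u_frame q14
      have r13 : UInt64.ofNat (s_103653r.mem.readLE (u.reg .rsp - 24) 8) = u.reg .r13 := by u_frame q13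
      have r12 : UInt64.ofNat (s_103653r.mem.readLE (u.reg .rsp - 32) 8) = u.reg .r12 := by u_frame q12
      have rbp : UInt64.ofNat (s_103653r.mem.readLE (u.reg .rsp - 40) 8) = u.reg .rbp := by u_frame qbp
      have rbx : UInt64.ofNat (s_103653r.mem.readLE (u.reg .rsp - 48) 8) = u.reg .rbx := by u_frame qbx
      have r0 : UInt64.ofNat (s_103653r.mem.readLE (u.reg .rsp) 8) = ret := by u_frame q0
      have rout : s_103653r.mem.readLE (u.reg .rsp - 216) 8 = 4194304 := by u_frame qout
      have rst : s_103653r.mem.readLE (u.reg .rsp - 232) 8 = st := by u_frame qst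
      -- the footprint so far
      have hp3 := Mem.SameExcept.step_writeLE' (u.reg .rsp - 152) 4 (Word.part Width.w32 (s_103648r.reg Reg.rax)).toNat hsame1
        (by u_omega) (by u_same_side)
      have hp4 := Mem.SameExcept.step_writeLE' (u.reg .rsp - 240) 8 1062488 hp3 (by u_omega) (by u_same_side)
      have hsame' := seg5_through_callee hp4 w_same (by
        simp only [List.forall_mem_cons, List.not_mem_nil, false_imp_iff, implies_true, and_true, X86.User.inSpans_cons,
          X86.User.inSpans_nil, or_false]
        repeat' apply And.intro
        all_goals u_omega)
      -- the shadow layer: no shadow byte was written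
      have hinv3 : ShadowInv others' (decode_all.ownFrames u frames) ((u.reg .rsp).toNat - 232) s_103653r.mem := by
        refine ShadowInv.untouched ?_ hun2
        refine ShadowInv.writeLE (ShadowInv.writeLE hinv1 _ _ _ ?_ ?_) _ _ _ ?_ ?_
        · u_omega
        · u_omega
        · u_omega
        · u_omega
      have hfrm' : decode_all.DFrame others frames len u₀ u ret others' s_103653r :=
        ⟨he0, hpre0, w_rsp, r15, r14, r13, r12, rbp, rbx, r0, rout, hsame', w_code, w_inv, hinv3, hfixed, hoffT⟩
      refine ReachVia.done ⟨w_rip, hfrm', w_r13, ?_, rst, hstle⟩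
      rw [w_kept .rbx rfl]
      exact c_rbx
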